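-- pv_equiv track=rewrite | github.com/simon-benigeri/narrative-generation | pipelines/process_scripts.py | is_screenpy_script_valid
-- ===== SOURCE A (Python) =====
-- def is_screenpy_script_valid(script_dict):
--     # Skip if empty script
--     if len(script_dict) == 0:
--         return False
--
--     num_heading = 0
--     num_speaker = 0
--     # Loop through script for other errors
--     for scene in script_dict:
--         for line in scene:
--             if line["head_type"] == "heading": num_heading += 1
--             if line["head_type"] == "speaker/title": num_speaker += 1
--
--     # Skip if either heading or speaker is 0
--     if num_heading == 0 or num_speaker == 0:
--         return False
--
--     # All good if we get here
--     return True
-- ===== SOURCE B (Python) =====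
-- def is_screenpy_script_valid(script_dict):
--     # Stage 1: flatten the nested scenes into one flat list of lines.
--     lines = [line for scene in script_dict for line in scene]
--
--     # Stage 2: a short-circuiting search for a given head_type.
--     def has_type(t):
--         for line in lines:
--             if line["head_type"] == t:
--                 return True
--         return False
--
--     return has_type("heading") and has_type("speaker/title")
-- ===== Notes on version B (the rewrite author's own statement) =====
-- stated objective: alternative
-- what changed: Replaces A's single nested pass with two incrementing counters and final zero tests by a staged decomposition: flatten the script once into a flat line list, then run two independent short-circuiting searches (early return on first match), one per required head_type; the empty-script guard disappears because both searches fail on an empty list.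
import Mathlib
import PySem

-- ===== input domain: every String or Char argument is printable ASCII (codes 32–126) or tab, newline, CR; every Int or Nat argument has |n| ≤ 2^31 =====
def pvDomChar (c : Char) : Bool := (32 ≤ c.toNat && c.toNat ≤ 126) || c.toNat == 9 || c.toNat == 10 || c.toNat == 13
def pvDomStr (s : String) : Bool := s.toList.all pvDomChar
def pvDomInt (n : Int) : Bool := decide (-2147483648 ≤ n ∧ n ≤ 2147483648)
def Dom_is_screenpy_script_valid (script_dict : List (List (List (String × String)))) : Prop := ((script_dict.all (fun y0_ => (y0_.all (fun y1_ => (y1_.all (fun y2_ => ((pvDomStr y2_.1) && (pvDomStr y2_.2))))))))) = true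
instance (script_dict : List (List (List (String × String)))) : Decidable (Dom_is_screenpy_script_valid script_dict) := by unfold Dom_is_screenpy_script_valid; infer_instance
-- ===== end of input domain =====

-- B replaces A's single nested counting pass by a staged decomposition: flatten once,
-- then two independent short-circuiting searches, one per required head_type (objective: alternative).

-- line["head_type"]: first-match association-list lookup, defaulted (Pre_ guarantees the key exists)
def pvHeadType (line : List (String × String)) : String := (line.lookup "head_type").getD ""

-- ===== PORT A =====
def is_screenpy_script_valid (script_dict : List (List (List (String × String)))) : Bool :=
  if script_dict.length == 0 then false
  else
    let counts : Int × Int :=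
      script_dict.foldl (fun acc scene =>
        scene.foldl (fun (p : Int × Int) line =>
          let p1 := if pvHeadType line == "heading" then (p.1 + 1, p.2) else p
          if pvHeadType line == "speaker/title" then (p1.1, p1.2 + 1) else p1) acc)
        (0, 0)
    if counts.1 == 0 || counts.2 == 0 then false else true

-- ===== PORT B =====
-- the short-circuiting search loop of Source B (for … if … return True … return False)
def pvHasType (lines : List (List (String × String))) (t : String) : Bool :=
  match lines with
  | [] => false
  | line :: rest => if pvHeadType line == t then true else pvHasType rest t

def is_screenpy_script_valid_alt (script_dict : List (List (List (String × String)))) : Bool :=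
  let lines := script_dict.flatMap (fun scene => scene)
  pvHasType lines "heading" && pvHasType lines "speaker/title"

-- ===== PRECONDITION & SPEC =====
-- Pre_ excludes exactly the inputs where some line lacks the key "head_type": there both A and B raise KeyError.
def Pre_is_screenpy_script_valid (script_dict : List (List (List (String × String)))) : Prop :=
  ∀ scene ∈ script_dict, ∀ line ∈ scene, "head_type" ∈ line.map Prod.fst
instance (script_dict : List (List (List (String × String)))) : Decidable (Pre_is_screenpy_script_valid script_dict) := by unfold Pre_is_screenpy_script_valid; infer_instance
def pvWitness_is_screenpy_script_valid : (List (List (List (String × String)))) :=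
  [[[("head_type", "heading")], [("head_type", "speaker/title")]]]
def Spec_is_screenpy_script_valid (script_dict : List (List (List (String × String)))) (out : Bool) : Prop := out = is_screenpy_script_valid_alt script_dict
instance (script_dict : List (List (List (String × String)))) (out : Bool) : Decidable (Spec_is_screenpy_script_valid script_dict out) := by unfold Spec_is_screenpy_script_valid; infer_instance

-- ===== CLAIM =====
def Claim_equal_is_screenpy_script_valid : Prop := ∀ (script_dict : List (List (List (String × String)))), Dom_is_screenpy_script_valid script_dict → Pre_is_screenpy_script_valid script_dict → Spec_is_screenpy_script_valid script_dict (is_screenpy_script_valid script_dict)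

-- ===== LEMMAS AND PROOFS =====

-- B's search loop is List.any
theorem pvHasType_eq_any (lines : List (List (String × String))) (t : String) :
    pvHasType lines t = lines.any (fun line => pvHeadType line == t) := by
  induction lines with
  | nil => rfl
  | cons l ls ih => by_cases h : pvHeadType l == t <;> simp [pvHasType, h, ih]

-- A's counter fold over one scene, characterised by countP
theorem pvCounts_fold (scene : List (List (String × String))) (p : Int × Int) :
    scene.foldl (fun (p : Int × Int) line =>
        let p1 := if pvHeadType line == "heading" then (p.1 + 1, p.2) else p
        if pvHeadType line == "speaker/title" then (p1.1, p1.2 + 1) else p1) p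
    = (p.1 + (scene.countP (fun line => pvHeadType line == "heading") : Int),
       p.2 + (scene.countP (fun line => pvHeadType line == "speaker/title") : Int)) := by
  induction scene generalizing p with
  | nil => simp
  | cons l ls ih =>
    simp only [List.foldl_cons, List.countP_cons, ih]
    by_cases h1 : pvHeadType l == "heading" <;> by_cases h2 : pvHeadType l == "speaker/title" <;>
      simp [h1, h2, Prod.ext_iff] <;> omega

-- A's full nested fold, characterised by countP over the flattened lines
theorem pvCountsA (s : List (List (List (String × String)))) (p : Int × Int) :
    s.foldl (fun acc scene =>
        scene.foldl (fun (p : Int × Int) line =>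
          let p1 := if pvHeadType line == "heading" then (p.1 + 1, p.2) else p
          if pvHeadType line == "speaker/title" then (p1.1, p1.2 + 1) else p1) acc) p
    = (p.1 + ((s.flatMap (fun scene => scene)).countP (fun line => pvHeadType line == "heading") : Int),
       p.2 + ((s.flatMap (fun scene => scene)).countP (fun line => pvHeadType line == "speaker/title") : Int)) := by
  induction s generalizing p with
  | nil => simp
  | cons sc ss ih =>
    rw [List.foldl_cons, pvCounts_fold, ih]
    simp [List.countP_append, Prod.ext_iff]; omega

-- ===== VERDICT =====
theorem is_screenpy_script_valid_spec : Claim_equal_is_screenpy_script_valid := by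
  intro s _ _
  unfold Spec_is_screenpy_script_valid
  rcases s with _ | ⟨sc, ss⟩
  · rfl
  · have key : ∀ t : String,
        (¬ List.countP (fun line => pvHeadType line == t) (List.flatMap (fun scene => scene) (sc :: ss)) = 0)
        ↔ (List.flatMap (fun scene => scene) (sc :: ss)).any (fun line => pvHeadType line == t) = true := by
      intro t
      rw [List.countP_eq_zero, List.any_eq_true]
      push Not
      simp
    rw [Bool.eq_iff_iff]
    unfold is_screenpy_script_valid is_screenpy_script_valid_alt
    rw [pvCountsA]
    simp only [pvHasType_eq_any, Bool.and_eq_true, List.length_cons, beq_iff_eq,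
      Bool.or_eq_true, Nat.cast_eq_zero, zero_add]
    rw [← key, ← key]
    split_ifs with h0 h1 h2 <;> simp only [false_iff, true_iff] <;> tauto
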